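-- pv_equiv track=rewrite | github.com/israelcamp/advent-of-code | 2024/day4/solution.py | build_right_diagonal
-- ===== SOURCE A (Python) =====
-- def build_right_diagonal(
--     data: list[list[str]], rowi: int, colj: int
-- ) -> tuple[list[str], int]:
--     initial_rowi, initial_colj = rowi, colj
--
--     down = [data[rowi][colj]]
--     N, M = len(data), len(data[0])
--     while True:
--         rowi = rowi + 1
--         colj = colj + 1
--
--         if rowi >= N or colj >= M:
--             break
--
--         down.append(data[rowi][colj])
--
--     rowi, colj = initial_rowi, initial_colj
--     up = []
--     while True:
--         rowi = rowi - 1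
--         colj = colj - 1
--
--         if rowi < 0 or colj < 0:
--             break
--
--         up.append(data[rowi][colj])
--
--     diagonal = list(reversed(up)) + down
--     new_j = len(up)
--     return diagonal, new_j
-- ===== SOURCE B (Python) =====
-- def build_right_diagonal(data, rowi, colj):
--     N, M = len(data), len(data[0])
--     data[rowi][colj]  # the start cell is part of the diagonal: fail fast if it is out of range
--     # walk up-left to the diagonal's top-left origin, counting the steps
--     k = 0
--     while rowi - 1 >= 0 and colj - 1 >= 0:
--         rowi -= 1
--         colj -= 1
--         k += 1
--     # one forward sweep collects the whole diagonal
--     diagonal = []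
--     while rowi < N and colj < M:
--         diagonal.append(data[rowi][colj])
--         rowi += 1
--         colj += 1
--     return diagonal, k
-- ===== Notes on version B (the rewrite author's own statement) =====
-- stated objective: simpler
-- what changed: B walks up-left counting steps to the diagonal's top-left origin and then collects the whole diagonal in one forward sweep, replacing A's two collection lists, the reversal and the concatenation.
-- outside the precondition, e.g. on build_right_diagonal([['a'], ['b', 'c']], 1, 1): A returns (['a', 'c'], 1), B returns (['a'], 1)
import Mathlib
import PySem

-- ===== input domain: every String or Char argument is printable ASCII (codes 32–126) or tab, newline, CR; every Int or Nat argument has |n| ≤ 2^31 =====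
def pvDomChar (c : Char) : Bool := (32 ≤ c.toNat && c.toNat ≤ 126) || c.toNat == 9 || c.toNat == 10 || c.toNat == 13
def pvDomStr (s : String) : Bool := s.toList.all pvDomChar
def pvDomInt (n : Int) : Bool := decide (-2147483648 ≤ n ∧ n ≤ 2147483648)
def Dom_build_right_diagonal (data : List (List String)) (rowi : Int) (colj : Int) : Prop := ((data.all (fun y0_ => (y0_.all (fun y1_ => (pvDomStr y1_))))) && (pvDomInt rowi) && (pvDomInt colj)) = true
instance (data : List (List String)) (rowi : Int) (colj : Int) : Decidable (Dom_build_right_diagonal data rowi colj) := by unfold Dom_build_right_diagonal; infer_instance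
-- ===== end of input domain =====

-- B replaces A's two collection loops + list reversal + concatenation by one forward sweep
-- from the precomputed top-left origin of the diagonal (objective: simpler decomposition).


-- ===== PORT A =====
-- data[r][c] (Python indexing, negative = from the end); exact on in-range reads, which
-- Pre_ guarantees for every read either port performs.
def pvCellA (data : List (List String)) (r c : Int) : String :=
  PySem.List.pyGetD (PySem.List.pyGetD data r []) c ""

-- A's first while-loop (down), fuel-guarded; fuel (N - rowi).toNat provably suffices on Pre_.
def pvDownA (data : List (List String)) (N M : Int) : Int → Int → Nat → List String
  | _, _, 0 => []
  | r, c, fuel+1 =>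
    if r + 1 ≥ N ∨ c + 1 ≥ M then []
    else pvCellA data (r + 1) (c + 1) :: pvDownA data N M (r + 1) (c + 1) fuel

-- A's second while-loop (up), fuel-guarded; fuel rowi.toNat provably suffices on Pre_.
def pvUpA (data : List (List String)) : Int → Int → Nat → List String
  | _, _, 0 => []
  | r, c, fuel+1 =>
    if r - 1 < 0 ∨ c - 1 < 0 then []
    else pvCellA data (r - 1) (c - 1) :: pvUpA data (r - 1) (c - 1) fuel

def build_right_diagonal (data : List (List String)) (rowi : Int) (colj : Int) : List String × Int :=
  let N : Int := data.length
  let M : Int := (data.headD []).length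
  let down := pvCellA data rowi colj :: pvDownA data N M rowi colj (N - rowi).toNat
  let up := pvUpA data rowi colj rowi.toNat
  (up.reverse ++ down, (up.length : Int))

-- ===== PORT B =====
def pvCellB (data : List (List String)) (r c : Int) : String :=
  PySem.List.pyGetD (PySem.List.pyGetD data r []) c ""

-- B's origin-finding loop: walk up-left counting steps; fuel rowi.toNat provably suffices.
def pvBackB : Int → Int → Int → Nat → Int × Int × Int
  | r, c, k, 0 => (r, c, k)
  | r, c, k, fuel+1 =>
    if r - 1 ≥ 0 ∧ c - 1 ≥ 0 then pvBackB (r - 1) (c - 1) (k + 1) fuel else (r, c, k)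

-- B's single forward sweep; fuel (N - r).toNat provably suffices.
def pvFwdB (data : List (List String)) (N M : Int) : Int → Int → Nat → List String
  | _, _, 0 => []
  | r, c, fuel+1 =>
    if r < N ∧ c < M then pvCellB data r c :: pvFwdB data N M (r + 1) (c + 1) fuel
    else []

def build_right_diagonal_alt (data : List (List String)) (rowi : Int) (colj : Int) : List String × Int :=
  let _start := pvCellB data rowi colj  -- B's fail-fast read of the start cell (in range on Pre_)
  let s := pvBackB rowi colj 0 rowi.toNat
  let N : Int := data.length
  let M : Int := (data.headD []).length
  (pvFwdB data N M s.1 s.2.1 (N - s.1).toNat, s.2.2)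

-- ===== PRECONDITION & SPEC =====
-- Pre_ = nonempty grid, start cell within the bounds of both the first row and its own
-- row (possibly negative, per Python indexing), and every cell the diagonal visits in
-- range of its own row. Outside it A raises IndexError, except on a ragged grid whose
-- over-long row lets A start at a column ≥ len(data[0]): there A's extra reads past the
-- first row's width are accidental and B stops at that width (see the cite).
def Pre_build_right_diagonal (data : List (List String)) (rowi : Int) (colj : Int) : Prop :=
  data ≠ [] ∧
  -(data.length : Int) ≤ rowi ∧ rowi < (data.length : Int) ∧
  -((data.headD []).length : Int) ≤ colj ∧ colj < ((data.headD []).length : Int) ∧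
  (-((PySem.List.pyGetD data rowi []).length : Int) ≤ colj ∧
    colj < ((PySem.List.pyGetD data rowi []).length : Int)) ∧
  (∀ t ∈ List.range (2 * data.length + 1), 1 ≤ t →
    ((rowi + t < (data.length : Int) → colj + t < ((data.headD []).length : Int) →
      -((PySem.List.pyGetD data (rowi + t) []).length : Int) ≤ colj + t ∧
        colj + t < ((PySem.List.pyGetD data (rowi + t) []).length : Int)) ∧
     (0 ≤ rowi - t → 0 ≤ colj - t →
      colj - t < ((PySem.List.pyGetD data (rowi - t) []).length : Int))))

instance (data : List (List String)) (rowi : Int) (colj : Int) : Decidable (Pre_build_right_diagonal data rowi colj) := by unfold Pre_build_right_diagonal; infer_instance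

def pvWitness_build_right_diagonal : List (List String) × Int × Int := ([["a", "b"], ["c", "d"]], 1, 0)

def Spec_build_right_diagonal (data : List (List String)) (rowi : Int) (colj : Int) (out : List String × Int) : Prop := out = build_right_diagonal_alt data rowi colj
instance (data : List (List String)) (rowi : Int) (colj : Int) (out : List String × Int) : Decidable (Spec_build_right_diagonal data rowi colj out) := by unfold Spec_build_right_diagonal; infer_instance

-- ===== CLAIM (what is proved, stated in full; the proofs are below) =====
def Claim_equal_build_right_diagonal : Prop := ∀ (data : List (List String)) (rowi : Int) (colj : Int), Dom_build_right_diagonal data rowi colj → Pre_build_right_diagonal data rowi colj → Spec_build_right_diagonal data rowi colj (build_right_diagonal data rowi colj)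

-- ===== LEMMAS AND PROOFS =====

-- number of up-left steps from (r, c) to the diagonal's origin
def pvK (r c : Int) : Int := max 0 (min r c)

theorem pvCellA_eq_pvCellB (data : List (List String)) (r c : Int) :
    pvCellA data r c = pvCellB data r c := rfl

theorem pvFwdB_dead (data : List (List String)) (N M : Int) (r c : Int) (f : Nat)
    (h : N ≤ r) : pvFwdB data N M r c f = [] := by
  cases f with
  | zero => rfl
  | succ g =>
    simp only [pvFwdB]
    rw [if_neg (by omega : ¬(r < N ∧ c < M))]

-- fuel irrelevance: any fuel ≥ (N - r).toNat gives the same forward sweep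
theorem pvFwdB_fuel (data : List (List String)) (N M : Int) :
    ∀ (f g : Nat) (r c : Int), (N - r).toNat ≤ f → (N - r).toNat ≤ g →
      pvFwdB data N M r c f = pvFwdB data N M r c g := by
  intro f
  induction f with
  | zero =>
    intro g r c hf _
    exact (pvFwdB_dead data N M r c g (by omega)).symm
  | succ f ih =>
    intro g r c hf hg
    cases g with
    | zero =>
      exact pvFwdB_dead data N M r c (f+1) (by omega)
    | succ g =>
      simp only [pvFwdB]
      split_ifs with h
      · rw [ih g (r+1) (c+1) (by omega) (by omega)]
      · rfl

theorem pvDownA_eq_fwd (data : List (List String)) (N M : Int) :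
    ∀ (f : Nat) (r c : Int), pvDownA data N M r c f = pvFwdB data N M (r + 1) (c + 1) f := by
  intro f
  induction f with
  | zero => intro r c; rfl
  | succ f ih =>
    intro r c
    simp only [pvDownA, pvFwdB]
    by_cases h : r + 1 < N ∧ c + 1 < M
    · rw [if_neg (by omega : ¬(r + 1 ≥ N ∨ c + 1 ≥ M)), if_pos h, ih, pvCellA_eq_pvCellB]
    · rw [if_pos (by omega : r + 1 ≥ N ∨ c + 1 ≥ M), if_neg h]

-- peel: prepending the current cell extends the forward sweep by one step
theorem pvFwdB_cons (data : List (List String)) (N M : Int) (r c : Int) (f : Nat)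
    (hr : r < N) (hc : c < M) :
    pvFwdB data N M r c (f + 1) = pvCellB data r c :: pvFwdB data N M (r + 1) (c + 1) f := by
  simp only [pvFwdB, if_pos (And.intro hr hc)]

-- A's reversed up-list glued onto a forward sweep = the forward sweep from the origin
theorem pvUpA_reverse_fwd (data : List (List String)) (N M : Int) :
    ∀ (f : Nat) (r c : Int) (g : Nat), r ≤ N → c ≤ M → r.toNat ≤ f →
      (pvUpA data r c f).reverse ++ pvFwdB data N M r c g
        = pvFwdB data N M (r - pvK r c) (c - pvK r c) (g + (pvK r c).toNat) := by
  intro f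
  induction f with
  | zero =>
    intro r c g hr hc hf
    have hk : pvK r c = 0 := by unfold pvK; omega
    simp [pvUpA, hk]
  | succ f ih =>
    intro r c g hr hc hf
    by_cases h : r - 1 < 0 ∨ c - 1 < 0
    · have hk : pvK r c = 0 := by unfold pvK; omega
      simp only [pvUpA]
      rw [if_pos h]
      simp [hk]
    · have hr1 : 1 ≤ r := by omega
      have hc1 : 1 ≤ c := by omega
      simp only [pvUpA]
      rw [if_neg h]
      simp only [List.reverse_cons, List.append_assoc, List.cons_append, List.nil_append]
      have hpeel := pvFwdB_cons data N M (r - 1) (c - 1) g (by omega) (by omega)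
      rw [show r - 1 + 1 = r from by ring, show c - 1 + 1 = c from by ring] at hpeel
      rw [pvCellA_eq_pvCellB, ← hpeel]
      rw [ih (r - 1) (c - 1) (g + 1) (by omega) (by omega) (by omega)]
      have hk : pvK (r - 1) (c - 1) = pvK r c - 1 := by unfold pvK; omega
      have hk0 : 0 ≤ pvK (r - 1) (c - 1) := by unfold pvK; omega
      rw [hk]
      congr 1 <;> omega

theorem pvUpA_length (data : List (List String)) :
    ∀ (f : Nat) (r c : Int), r.toNat ≤ f → ((pvUpA data r c f).length : Int) = pvK r c := by
  intro f
  induction f with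
  | zero =>
    intro r c hf
    have hk : pvK r c = 0 := by unfold pvK; omega
    simp [pvUpA, hk]
  | succ f ih =>
    intro r c hf
    by_cases h : r - 1 < 0 ∨ c - 1 < 0
    · have hk : pvK r c = 0 := by unfold pvK; omega
      simp only [pvUpA]
      rw [if_pos h]
      simp [hk]
    · simp only [pvUpA]
      rw [if_neg h]
      simp only [List.length_cons]
      push_cast
      rw [ih (r - 1) (c - 1) (by omega)]
      unfold pvK; omega

theorem pvBackB_eq :
    ∀ (f : Nat) (r c k : Int), r.toNat ≤ f →
      pvBackB r c k f = (r - pvK r c, c - pvK r c, k + pvK r c) := by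
  intro f
  induction f with
  | zero =>
    intro r c k hf
    have hk : pvK r c = 0 := by unfold pvK; omega
    simp [pvBackB, hk]
  | succ f ih =>
    intro r c k hf
    by_cases h : r - 1 ≥ 0 ∧ c - 1 ≥ 0
    · rw [pvBackB, if_pos h, ih (r - 1) (c - 1) (k + 1) (by omega)]
      have hk : pvK (r - 1) (c - 1) = pvK r c - 1 := by unfold pvK; omega
      rw [hk]
      simp only [Prod.mk.injEq]
      refine ⟨by omega, by omega, by omega⟩
    · have hk : pvK r c = 0 := by unfold pvK; omega
      rw [pvBackB, if_neg h, hk]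
      simp only [Prod.mk.injEq]
      refine ⟨by omega, by omega, by omega⟩

-- ===== VERDICT (by name: the statement is the Claim_ definition above) =====
theorem build_right_diagonal_spec : Claim_equal_build_right_diagonal := by
  intro data rowi colj _ hPre
  obtain ⟨hne, hr0, hrN, hc0, hcM, -, -⟩ := hPre
  unfold Spec_build_right_diagonal build_right_diagonal build_right_diagonal_alt
  set N : Int := (data.length : Int) with hN
  set M : Int := ((data.headD []).length : Int) with hM
  have hK0 : 0 ≤ pvK rowi colj := by unfold pvK; omega
  have hback : pvBackB rowi colj 0 rowi.toNat
      = (rowi - pvK rowi colj, colj - pvK rowi colj, 0 + pvK rowi colj) :=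
    pvBackB_eq rowi.toNat rowi colj 0 (by omega)
  rw [hback]
  refine Prod.ext ?_ ?_
  · -- the diagonal lists agree
    simp only
    rw [pvDownA_eq_fwd data N M ((N - rowi).toNat) rowi colj, pvCellA_eq_pvCellB,
      ← pvFwdB_cons data N M rowi colj ((N - rowi).toNat) hrN hcM,
      pvUpA_reverse_fwd data N M rowi.toNat rowi colj ((N - rowi).toNat + 1)
        (by omega) (by omega) (by omega)]
    exact pvFwdB_fuel data N M _ _ _ _ (by omega) (by omega)
  · -- the step counts agree
    simpa using pvUpA_length data rowi.toNat rowi colj (by omega)
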